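-- pv_equiv track=rewrite | github.com/Shivam5560/Professional_Grade_RAG | backend/app/api/routes/chat.py | _sanitize_ask_markdown
-- ===== SOURCE A (Python) =====
-- def _sanitize_ask_markdown(text: str) -> str:
--     """Normalize malformed emphasis markers in ask-mode output."""
--     if not text:
--         return text
--
--     def _normalize_unmatched_delimiters(value: str, delimiter: str) -> str:
--         parts = value.split(delimiter)
--         if len(parts) <= 2:
--             return value
--         delimiter_count = len(parts) - 1
--         if delimiter_count % 2 == 0:
--             return value
--
--         last_index = value.rfind(delimiter)
--         if last_index == -1:
--             return value
--         return f"{value[:last_index]}{value[last_index + len(delimiter):]}"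
--
--     def _normalize_table_cell_emphasis(value: str) -> str:
--         normalized_lines = []
--         for line in value.split("\n"):
--             trimmed = line.strip()
--             if not trimmed.startswith("|") or "|" not in trimmed:
--                 normalized_lines.append(line)
--                 continue
--
--             cells = line.split("|")
--             if len(cells) < 3:
--                 normalized_lines.append(line)
--                 continue
--
--             normalized_cells = []
--             for idx, cell in enumerate(cells):
--                 if idx == 0 or idx == len(cells) - 1:
--                     normalized_cells.append(cell)
--                     continue
--
--                 cleaned = _normalize_unmatched_delimiters(cell, "**")
--                 cleaned = _normalize_unmatched_delimiters(cleaned, "__")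
--                 normalized_cells.append(cleaned)
--
--             normalized_lines.append("|".join(normalized_cells))
--
--         return "\n".join(normalized_lines)
--
--     sanitized = _normalize_table_cell_emphasis(text)
--     sanitized_lines = []
--     for line in sanitized.split("\n"):
--         line = _normalize_unmatched_delimiters(line, "**")
--         line = _normalize_unmatched_delimiters(line, "__")
--         sanitized_lines.append(line)
--
--     return "\n".join(sanitized_lines)
-- ===== SOURCE B (Python) =====
-- def _sanitize_ask_markdown(text: str) -> str:
--     """Single fused pass over the lines; the unmatched-delimiter fix is done by a
--     character-level scan (greedy non-overlapping count + rightmost match index)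
--     instead of split/rfind."""
--
--     def _normalize_unmatched_delimiters(value: str, delimiter: str) -> str:
--         d0, d1 = delimiter  # both delimiters used here are two characters
--         count = 0
--         last = -1
--         blocked = False
--         for i, (x, y) in enumerate(zip(value, value[1:])):
--             if x == d0 and y == d1:
--                 last = i
--                 if blocked:
--                     blocked = False
--                 else:
--                     count += 1
--                     blocked = True
--             else:
--                 blocked = False
--         if count >= 3 and count % 2 == 1:
--             return value[:last] + value[last + 2:]
--         return value
--
--     def _fix_line(line: str) -> str:
--         if line.strip().startswith("|"):
--             cells = line.split("|")
--             if len(cells) >= 3: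
--                 middle = [
--                     _normalize_unmatched_delimiters(
--                         _normalize_unmatched_delimiters(cell, "**"), "__")
--                     for cell in cells[1:-1]
--                 ]
--                 line = "|".join(cells[:1] + middle + cells[-1:])
--         return _normalize_unmatched_delimiters(
--             _normalize_unmatched_delimiters(line, "**"), "__")
--
--     return "\n".join(_fix_line(line) for line in text.split("\n"))
-- ===== Notes on version B (the rewrite author's own statement) =====
-- stated objective: alternative
-- what changed: The unmatched-delimiter helper no longer splits the string and calls rfind: it is one character-level scan over adjacent pairs that maintains the greedy non-overlapping delimiter count, a blocked flag, and the rightmost match index, then slices once; and A's two sequential passes (whole-text table-cell pass, then a second split/join line pass) are fused into one loop over the lines with a first/middle/last slice decomposition of the cells.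
import Mathlib
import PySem

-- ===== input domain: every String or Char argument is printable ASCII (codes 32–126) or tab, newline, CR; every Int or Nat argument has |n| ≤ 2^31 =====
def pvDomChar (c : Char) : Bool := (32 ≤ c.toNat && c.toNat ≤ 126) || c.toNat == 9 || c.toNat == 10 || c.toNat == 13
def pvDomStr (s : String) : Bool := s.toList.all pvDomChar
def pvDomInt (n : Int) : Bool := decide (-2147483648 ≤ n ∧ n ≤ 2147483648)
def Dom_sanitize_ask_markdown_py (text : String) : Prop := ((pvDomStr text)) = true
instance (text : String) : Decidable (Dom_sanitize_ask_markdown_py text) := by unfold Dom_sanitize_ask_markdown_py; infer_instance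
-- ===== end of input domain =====

-- B replaces the split/rfind delimiter helper by one character-level scan (greedy
-- non-overlapping count, blocked flag, rightmost match index) and fuses A's two
-- sequential passes into one loop over the lines (objective: alternative).

-- ===== PORT A =====
-- Python helper _normalize_unmatched_delimiters, transliterated
def pvNormDelimA (value delim : List Char) : List Char :=
  let parts := PySem.Chars.splitOn value delim
  if parts.length ≤ 2 then value
  else if (parts.length - 1) % 2 = 0 then value
  else
    let last_index := PySem.Chars.rfind value delim
    if last_index = -1 then value
    else
      PySem.List.slice value none (some last_index) ++
        PySem.List.slice value (some (last_index + PySem.Chars.len delim)) none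

-- one line of _normalize_table_cell_emphasis's loop body
def pvTableLineA (line : List Char) : List Char :=
  let trimmed := PySem.Chars.strip line
  if !PySem.Chars.startswith trimmed ['|'] || !PySem.Chars.isIn ['|'] trimmed then line
  else
    let cells := PySem.Chars.splitOn line ['|']
    if cells.length < 3 then line
    else
      PySem.Chars.join ['|']
        ((PySem.List.enumerate cells 0).foldl (fun acc p =>
          acc ++ [if p.1 = 0 ∨ p.1 = PySem.List.len cells - 1 then p.2
                  else pvNormDelimA (pvNormDelimA p.2 ['*', '*']) ['_', '_']]) [])

def sanitize_ask_markdown_py (text : String) : String :=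
  if text.toList = [] then text
  else
    let sanitized := PySem.Chars.join ['\n']
      ((PySem.Chars.splitOn text.toList ['\n']).foldl
        (fun acc line => acc ++ [pvTableLineA line]) [])
    String.ofList (PySem.Chars.join ['\n']
      ((PySem.Chars.splitOn sanitized ['\n']).foldl
        (fun acc line => acc ++ [pvNormDelimA (pvNormDelimA line ['*', '*']) ['_', '_']]) []))

-- ===== PORT B =====
-- B's scanner: 'for i, (x, y) in enumerate(zip(value, value[1:]))' with state
-- (count, last, blocked); structural recursion over adjacent pairs
def pvScanB (d0 d1 : Char) : List Char → Int → Bool → Nat → Int → Nat × Int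
  | x :: y :: rest, i, blocked, count, last =>
      if x = d0 ∧ y = d1 then
        if blocked then pvScanB d0 d1 (y :: rest) (i + 1) false count i
        else pvScanB d0 d1 (y :: rest) (i + 1) true (count + 1) i
      else pvScanB d0 d1 (y :: rest) (i + 1) false count last
  | _, _, _, count, last => (count, last)

-- B's helper: 'd0, d1 = delimiter', one scan, one slice
def pvNormDelimB (value : List Char) (d0 d1 : Char) : List Char :=
  let r := pvScanB d0 d1 value 0 false 0 (-1)
  if 3 ≤ r.1 ∧ r.1 % 2 = 1 then
    PySem.List.slice value none (some r.2) ++ PySem.List.slice value (some (r.2 + 2)) none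
  else value

-- _fix_line: table-cell fix via slices, then the line-level fix, in one place
def pvFixLineB (line : List Char) : List Char :=
  let line2 :=
    if PySem.Chars.startswith (PySem.Chars.strip line) ['|'] then
      let cells := PySem.Chars.splitOn line ['|']
      if 3 ≤ cells.length then
        PySem.Chars.join ['|']
          (PySem.List.slice cells none (some 1) ++
            (PySem.List.slice cells (some 1) (some (-1))).map
              (fun cell => pvNormDelimB (pvNormDelimB cell '*' '*') '_' '_') ++
            PySem.List.slice cells (some (-1)) none)
      else line
    else line
  pvNormDelimB (pvNormDelimB line2 '*' '*') '_' '_'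

def sanitize_ask_markdown_py_alt (text : String) : String :=
  String.ofList (PySem.Chars.join ['\n'] ((PySem.Chars.splitOn text.toList ['\n']).map pvFixLineB))

-- ===== PRECONDITION & SPEC =====
def Spec_sanitize_ask_markdown_py (text : String) (out : String) : Prop := out = sanitize_ask_markdown_py_alt text
instance (text : String) (out : String) : Decidable (Spec_sanitize_ask_markdown_py text out) := by unfold Spec_sanitize_ask_markdown_py; infer_instance

-- ===== CLAIM (what is proved, stated in full; the proofs are below) =====
def Claim_equal_sanitize_ask_markdown_py : Prop := ∀ (text : String), Dom_sanitize_ask_markdown_py text → Spec_sanitize_ask_markdown_py text (sanitize_ask_markdown_py text)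

-- ===== LEMMAS AND PROOFS =====

-- greedy non-overlapping count of the two-character delimiter, as split consumes it
def pvGc (d0 d1 : Char) : List Char → Nat
  | x :: y :: rest => if x = d0 ∧ y = d1 then pvGc d0 d1 rest + 1 else pvGc d0 d1 (y :: rest)
  | _ => 0

-- rightmost match position (acc if none)
def pvLastOcc (d0 d1 : Char) : List Char → Int → Int → Int
  | x :: y :: rest, i, acc => pvLastOcc d0 d1 (y :: rest) (i + 1) (if x = d0 ∧ y = d1 then i else acc)
  | _, _, acc => acc

theorem pvScan_fst (d0 d1 : Char) : ∀ (l : List Char) (i : Int) (c : Nat) (last : Int),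
    (pvScanB d0 d1 l i false c last).1 = c + pvGc d0 d1 l ∧
    (pvScanB d0 d1 l i true c last).1 = c + pvGc d0 d1 l.tail := by
  intro l
  induction l with
  | nil => intro i c last; simp [pvScanB, pvGc]
  | cons x l' ih =>
    intro i c last
    cases l' with
    | nil => simp [pvScanB, pvGc]
    | cons y rest =>
      constructor
      · by_cases h : x = d0 ∧ y = d1
        · have e : pvScanB d0 d1 (x :: y :: rest) i false c last =
              pvScanB d0 d1 (y :: rest) (i + 1) true (c + 1) i := by
            simp [pvScanB, h]
          rw [e, (ih (i + 1) (c + 1) i).2]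
          simp [pvGc, h]
          omega
        · have e : pvScanB d0 d1 (x :: y :: rest) i false c last =
              pvScanB d0 d1 (y :: rest) (i + 1) false c last := by
            simp [pvScanB, h]
          rw [e, (ih (i + 1) c last).1]
          simp [pvGc, h]
      · by_cases h : x = d0 ∧ y = d1
        · have e : pvScanB d0 d1 (x :: y :: rest) i true c last =
              pvScanB d0 d1 (y :: rest) (i + 1) false c i := by
            simp [pvScanB, h]
          rw [e, (ih (i + 1) c i).1]
          rfl
        · have e : pvScanB d0 d1 (x :: y :: rest) i true c last =
              pvScanB d0 d1 (y :: rest) (i + 1) false c last := by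
            simp [pvScanB, h]
          rw [e, (ih (i + 1) c last).1]
          rfl

theorem pvScan_snd (d0 d1 : Char) : ∀ (l : List Char) (i : Int) (b : Bool) (c : Nat) (last : Int),
    (pvScanB d0 d1 l i b c last).2 = pvLastOcc d0 d1 l i last := by
  intro l
  induction l with
  | nil => intro i b c last; simp [pvScanB, pvLastOcc]
  | cons x l' ih =>
    intro i b c last
    cases l' with
    | nil => simp [pvScanB, pvLastOcc]
    | cons y rest =>
      by_cases h : x = d0 ∧ y = d1
      · cases b <;> simp only [pvScanB, if_pos h, Bool.false_eq_true, if_false, if_true,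
          pvLastOcc] <;> rw [ih]
      · cases b <;> simp only [pvScanB, if_neg h, pvLastOcc] <;> rw [ih]

theorem pvLastOcc_cases (d0 d1 : Char) : ∀ (l : List Char) (p acc : Int),
    pvLastOcc d0 d1 l p acc = acc ∨ p ≤ pvLastOcc d0 d1 l p acc := by
  intro l
  induction l with
  | nil => intro p acc; simp [pvLastOcc]
  | cons x l' ih =>
    intro p acc
    cases l' with
    | nil => simp [pvLastOcc]
    | cons y rest =>
      simp only [pvLastOcc]
      by_cases h : x = d0 ∧ y = d1
      · rw [if_pos h]
        rcases ih (p + 1) p with h1 | h1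
        · right; omega
        · right; omega
      · rw [if_neg h]
        rcases ih (p + 1) acc with h1 | h1
        · left; exact h1
        · right; omega

theorem pvLastOcc_shift (d0 d1 : Char) : ∀ (l : List Char) (p acc : Int),
    pvLastOcc d0 d1 l p acc =
      if pvLastOcc d0 d1 l 0 (-1) = -1 then acc else pvLastOcc d0 d1 l 0 (-1) + p := by
  intro l
  induction l with
  | nil => intro p acc; simp [pvLastOcc]
  | cons x l' ih =>
    intro p acc
    cases l' with
    | nil => simp [pvLastOcc]
    | cons y rest =>
      have hM := pvLastOcc_cases d0 d1 (y :: rest) 1 0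
      have hM' := pvLastOcc_cases d0 d1 (y :: rest) 1 (-1)
      by_cases h : x = d0 ∧ y = d1
      · simp only [pvLastOcc, if_pos h, zero_add]
        rw [ih (p + 1) p, ih 1 0]
        by_cases hm : pvLastOcc d0 d1 (y :: rest) 0 (-1) = -1
        · rw [if_pos hm, if_pos hm]
          rw [if_neg (by omega)]
          omega
        · rw [if_neg hm, if_neg hm]
          rcases pvLastOcc_cases d0 d1 (y :: rest) 0 (-1) with h1 | h1
          · exact absurd h1 hm
          · rw [if_neg (by omega)]; omega
      · simp only [pvLastOcc, if_neg h, zero_add]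
        rw [ih (p + 1) acc, ih 1 (-1)]
        by_cases hm : pvLastOcc d0 d1 (y :: rest) 0 (-1) = -1
        · rw [if_pos hm, if_pos hm, if_pos rfl]
        · rcases pvLastOcc_cases d0 d1 (y :: rest) 0 (-1) with h1 | h1
          · exact absurd h1 hm
          · rw [if_neg hm, if_neg hm, if_neg (by omega)]; omega

-- A's rfind on a two-character needle: equation lemmas for the fuel recursion
theorem pvRfindGo_zero (d0 d1 : Char) (s : List Char) :
    PySem.Chars.rfind.go s [d0, d1] 0 = (if [d0, d1].isPrefixOf s then (0 : Int) else -1) := by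
  rw [PySem.Chars.rfind.go]

theorem pvRfindGo_succ (d0 d1 : Char) (s : List Char) (n : Nat) :
    PySem.Chars.rfind.go s [d0, d1] (n + 1) =
      (if [d0, d1].isPrefixOf (s.drop (n + 1)) then ((n : Int) + 1)
       else PySem.Chars.rfind.go s [d0, d1] n) := by
  rw [PySem.Chars.rfind.go]
  split
  · push_cast; ring
  · rfl

-- rfind peeled one character at a time
theorem pvRfindGo_cons (d0 d1 : Char) (c : Char) (s' : List Char) : ∀ (n : Nat),
    PySem.Chars.rfind.go (c :: s') [d0, d1] (n + 1) =
      (if PySem.Chars.rfind.go s' [d0, d1] n = -1 then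
        (if [d0, d1].isPrefixOf (c :: s') then (0 : Int) else -1)
      else PySem.Chars.rfind.go s' [d0, d1] n + 1) := by
  intro n
  induction n with
  | zero =>
    rw [pvRfindGo_succ, pvRfindGo_zero, pvRfindGo_zero]
    simp only [List.drop_succ_cons, List.drop_zero]
    by_cases h : [d0, d1].isPrefixOf s' = true
    · rw [if_pos h, if_pos h, if_neg (by omega)]
      ring
    · simp [h]
  | succ n ih =>
    rw [pvRfindGo_succ]
    simp only [List.drop_succ_cons]
    have hs := pvRfindGo_succ d0 d1 s' n
    by_cases h : [d0, d1].isPrefixOf (List.drop (n + 1) s') = true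
    · rw [if_pos h, hs, if_pos h, if_neg (by omega)]
      push_cast; ring
    · rw [if_neg h, ih, hs, if_neg h]

theorem pvRfind_nil (d0 d1 : Char) : PySem.Chars.rfind [] [d0, d1] = -1 := by
  rw [PySem.Chars.rfind]
  simp only [List.length_nil]
  rw [pvRfindGo_zero]
  rfl

theorem pvRfind_cons (d0 d1 c : Char) (s' : List Char) :
    PySem.Chars.rfind (c :: s') [d0, d1] =
      (if PySem.Chars.rfind s' [d0, d1] = -1 then
        (if [d0, d1].isPrefixOf (c :: s') then (0 : Int) else -1)
      else PySem.Chars.rfind s' [d0, d1] + 1) := by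
  simp only [PySem.Chars.rfind, List.length_cons]
  exact pvRfindGo_cons d0 d1 c s' s'.length

theorem pvLastOcc_eq_rfind (d0 d1 : Char) : ∀ (l : List Char),
    pvLastOcc d0 d1 l 0 (-1) = PySem.Chars.rfind l [d0, d1] := by
  intro l
  induction l with
  | nil => rw [pvRfind_nil]; simp [pvLastOcc]
  | cons x l' ih =>
    rw [pvRfind_cons, ← ih]
    cases l' with
    | nil =>
      simp [pvLastOcc, List.isPrefixOf]
    | cons y rest =>
      have hpre : [d0, d1].isPrefixOf (x :: y :: rest) = (decide (x = d0 ∧ y = d1)) := by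
        show (d0 == x && [d1].isPrefixOf (y :: rest)) = _
        show (d0 == x && (d1 == y && List.isPrefixOf [] rest)) = _
        simp only [List.isPrefixOf, Bool.and_true]
        rcases eq_or_ne x d0 with h1 | h1 <;> rcases eq_or_ne y d1 with h2 | h2 <;>
          simp [h1, h2]
        · exact h2.symm
        · exact h1.symm
        · exact fun e => absurd e.symm h1
      simp only [pvLastOcc, hpre, zero_add]
      rw [pvLastOcc_shift d0 d1 (y :: rest) 1]
      have hMnn := pvLastOcc_cases d0 d1 (y :: rest) 0 (-1)
      by_cases hm : pvLastOcc d0 d1 (y :: rest) 0 (-1) = -1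
      · rw [if_pos hm, if_pos hm]
        by_cases h : x = d0 ∧ y = d1
        · simp [h]
        · simp [h]
      · rw [if_neg hm, if_neg hm]

theorem pvScan_last_nonneg (d0 d1 : Char) (l : List Char)
    (h : pvLastOcc d0 d1 l 0 (-1) ≠ -1) : 0 ≤ pvLastOcc d0 d1 l 0 (-1) := by
  rcases pvLastOcc_cases d0 d1 l 0 (-1) with h1 | h1
  · exact absurd h1 h
  · exact h1

theorem pvGc_lastOcc (d0 d1 : Char) : ∀ (l : List Char),
    pvGc d0 d1 l ≠ 0 → pvLastOcc d0 d1 l 0 (-1) ≠ -1 := by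
  intro l
  induction l with
  | nil => intro h; simp [pvGc] at h
  | cons x l' ih =>
    intro h
    cases l' with
    | nil => simp [pvGc] at h
    | cons y rest =>
      simp only [pvLastOcc, zero_add]
      rw [pvLastOcc_shift d0 d1 (y :: rest) 1]
      by_cases hm : pvLastOcc d0 d1 (y :: rest) 0 (-1) = -1
      · rw [if_pos hm]
        by_cases hxy : x = d0 ∧ y = d1
        · simp [hxy]
        · exfalso
          have hgc : pvGc d0 d1 (x :: y :: rest) = pvGc d0 d1 (y :: rest) := by
            show (if x = d0 ∧ y = d1 then pvGc d0 d1 rest + 1 else pvGc d0 d1 (y :: rest)) = _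
            rw [if_neg hxy]
          rw [hgc] at h
          exact absurd hm (ih h)
      · rw [if_neg hm]
        have := pvScan_last_nonneg d0 d1 (y :: rest) hm
        omega

-- split parts = greedy count + 1
theorem pvSplitGo_len (d0 d1 : Char) : ∀ (fuel : Nat) (l cur : List Char) (acc : List (List Char)),
    l.length < fuel →
    (PySem.Chars.splitOn.go [d0, d1] fuel l cur acc).length = acc.length + 1 + pvGc d0 d1 l := by
  intro fuel
  induction fuel with
  | zero => intro l cur acc h; omega
  | succ n ih =>
    intro l cur acc h
    cases l with
    | nil =>
      rw [PySem.Chars.splitOn.go]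
      · simp [pvGc]
      · omega
    | cons c rest =>
      rw [PySem.Chars.splitOn.go]
      by_cases hp : [d0, d1].isPrefixOf (c :: rest) = true
      · rw [if_pos hp]
        cases rest with
        | nil => simp [List.isPrefixOf] at hp
        | cons y rest' =>
          have hc : c = d0 ∧ y = d1 := by
            simp [List.isPrefixOf] at hp
            exact ⟨hp.1.symm, hp.2.symm⟩
          simp only [List.length_cons] at h
          rw [show List.drop ([d0, d1].length) (c :: y :: rest') = rest' from rfl]
          rw [ih rest' [] (cur.reverse :: acc) (by omega)]
          simp only [pvGc, if_pos hc, List.length_cons]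
          omega
      · simp only [hp, Bool.false_eq_true, if_false]
        rw [ih rest (c :: cur) acc (by simp at h ⊢; omega)]
        cases rest with
        | nil => simp [pvGc]
        | cons y rest' =>
          have hc : ¬ (c = d0 ∧ y = d1) := by
            intro hcc
            apply hp
            simp [List.isPrefixOf, hcc.1, hcc.2]
          simp [pvGc, hc]

theorem pvSplit_len (d0 d1 : Char) (l : List Char) :
    (PySem.Chars.splitOn l [d0, d1]).length = pvGc d0 d1 l + 1 := by
  rw [PySem.Chars.splitOn, pvSplitGo_len d0 d1 (l.length + 1) l [] [] (by omega)]
  simp only [List.length_nil]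
  omega

-- B's helper = A's helper on any two-character delimiter
theorem pvNormDelim_eq (value : List Char) (d0 d1 : Char) :
    pvNormDelimB value d0 d1 = pvNormDelimA value [d0, d1] := by
  unfold pvNormDelimB pvNormDelimA
  have h1 := (pvScan_fst d0 d1 value 0 0 (-1)).1
  have h2 := pvScan_snd d0 d1 value 0 false 0 (-1)
  have h3 := pvLastOcc_eq_rfind d0 d1 value
  have h4 := pvSplit_len d0 d1 value
  simp only [h1, h2, h3, Nat.zero_add, h4]
  by_cases hle : pvGc d0 d1 value ≤ 1
  · rw [if_neg (by omega), if_pos (by omega)]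
  · by_cases hev : pvGc d0 d1 value % 2 = 0
    · rw [if_neg (by omega), if_neg (by omega), if_pos (by omega)]
    · rw [if_pos (by omega), if_neg (by omega), if_neg (by omega)]
      have hne : PySem.Chars.rfind value [d0, d1] ≠ -1 := by
        rw [← h3]
        exact pvGc_lastOcc d0 d1 value (by omega)
      rw [if_neg hne]
      have : PySem.Chars.len [d0, d1] = 2 := by simp
      rw [this]

theorem pvModifyHead_id {α : Type} (l : List α) : List.modifyHead (fun x => x) l = l := by
  cases l <;> simp

-- PySem's fuel-based split with a one-character separator is Mathlib's List.splitOn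
theorem pvGo_single (ch : Char) : ∀ (fuel : Nat) (l cur : List Char) (acc : List (List Char)),
    l.length < fuel →
    PySem.Chars.splitOn.go [ch] fuel l cur acc =
      acc.reverse ++ (List.splitOn ch l).modifyHead (cur.reverse ++ ·) := by
  intro fuel
  induction fuel with
  | zero => intro l cur acc h; omega
  | succ n ih =>
    intro l cur acc h
    cases l with
    | nil =>
      rw [PySem.Chars.splitOn.go]
      · simp [List.splitOn_nil]
      · omega
    | cons c rest =>
      rw [PySem.Chars.splitOn.go]
      by_cases hc : ch = c
      · subst hc
        have hpre : [ch].isPrefixOf (ch :: rest) = true := by simp [List.isPrefixOf]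
        rw [hpre, if_pos rfl]
        simp only [List.length_singleton, List.drop_succ_cons, List.drop_zero]
        rw [ih rest [] (cur.reverse :: acc) (by simpa using Nat.lt_of_succ_lt_succ h)]
        simp [List.splitOn, List.splitOnP_cons, pvModifyHead_id]
      · have hpre : [ch].isPrefixOf (c :: rest) = false := by
          simp [List.isPrefixOf, hc]
        rw [hpre]
        simp only [Bool.false_eq_true, if_false]
        rw [ih rest (c :: cur) acc (by simpa using Nat.lt_of_succ_lt_succ h)]
        simp only [List.splitOn, List.splitOnP_cons]
        have hpc : (c == ch) = false := by
          simp only [beq_eq_false_iff_ne, ne_eq]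
          exact fun e => hc e.symm
        rw [hpc]
        simp only [Bool.false_eq_true, if_false, List.modifyHead_modifyHead]
        have hfun : (fun x : List Char => (c :: cur).reverse ++ x) =
            ((fun x : List Char => cur.reverse ++ x) ∘ List.cons c) := by
          funext t; simp
        rw [hfun]

theorem pvSplitOn_single (cs : List Char) (ch : Char) :
    PySem.Chars.splitOn cs [ch] = List.splitOn ch cs := by
  rw [PySem.Chars.splitOn, pvGo_single ch (cs.length + 1) cs [] [] (by omega)]
  simp [pvModifyHead_id]

-- pieces of a split contain no separator, and only characters of the source
theorem pvSplitOn_sound (ch : Char) : ∀ (xs l : List Char), l ∈ List.splitOn ch xs →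
    ch ∉ l ∧ ∀ y ∈ l, y ∈ xs := by
  intro xs
  induction xs with
  | nil =>
    intro l hl
    simp [List.splitOn_nil] at hl
    simp [hl]
  | cons x xs ih =>
    intro l hl
    rw [List.splitOn, List.splitOnP_cons] at hl
    by_cases hx : x = ch
    · rw [if_pos (by simp [hx])] at hl
      rcases List.mem_cons.1 hl with h | h
      · simp [h]
      · obtain ⟨h1, h2⟩ := ih l h
        exact ⟨h1, fun y hy => List.mem_cons_of_mem _ (h2 y hy)⟩
    · rw [if_neg (by simp [hx])] at hl
      obtain ⟨p, ps, hps⟩ := List.exists_cons_of_ne_nil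
        (show List.splitOn ch xs ≠ [] from List.splitOnP_ne_nil _ xs)
      rw [show List.splitOnP (fun x => x == ch) xs = List.splitOn ch xs from rfl, hps] at hl
      simp only [List.modifyHead] at hl
      rcases List.mem_cons.1 hl with h | h
      · subst h
        obtain ⟨h1, h2⟩ := ih p (by rw [hps]; exact List.mem_cons_self)
        constructor
        · intro hmem
          rcases List.mem_cons.1 hmem with h | h
          · exact hx h.symm
          · exact h1 h
        · intro y hy
          rcases List.mem_cons.1 hy with h | h
          · simp [h]
          · exact List.mem_cons_of_mem _ (h2 y h)
      · obtain ⟨h1, h2⟩ := ih l (by rw [hps]; exact List.mem_cons_of_mem _ h)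
        exact ⟨h1, fun y hy => List.mem_cons_of_mem _ (h2 y hy)⟩

theorem pvMem_join (sep : List Char) : ∀ (parts : List (List Char)) (c : Char),
    c ∈ PySem.Chars.join sep parts → c ∈ sep ∨ ∃ p ∈ parts, c ∈ p := by
  intro parts
  induction parts with
  | nil => intro c hc; rw [PySem.Chars.join_nil] at hc; simp at hc
  | cons p ps ih =>
    intro c hc
    cases ps with
    | nil =>
      rw [PySem.Chars.join_singleton] at hc
      exact Or.inr ⟨p, by simp, hc⟩
    | cons q rest =>
      rw [PySem.Chars.join_cons_cons] at hc
      rcases List.mem_append.1 hc with h | h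
      · rcases List.mem_append.1 h with h | h
        · exact Or.inr ⟨p, by simp, h⟩
        · exact Or.inl h
      · rcases ih c h with h | ⟨r, hr, hcr⟩
        · exact Or.inl h
        · exact Or.inr ⟨r, List.mem_cons_of_mem _ hr, hcr⟩

theorem pvNoNl_normDelim (value delim : List Char) (h : '\n' ∉ value) :
    '\n' ∉ pvNormDelimA value delim := by
  simp only [pvNormDelimA]
  split_ifs with h1 h2 h3
  · exact h
  · exact h
  · exact h
  · intro hmem
    rcases List.mem_append.1 hmem with hm | hm
    · exact h (PySem.List.mem_of_mem_slice _ _ _ hm)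
    · exact h (PySem.List.mem_of_mem_slice _ _ _ hm)

theorem pvNoNl_table (line : List Char) (h : '\n' ∉ line) : '\n' ∉ pvTableLineA line := by
  simp only [pvTableLineA]
  split_ifs with h1 h2
  · exact h
  · exact h
  · intro hmem
    rcases pvMem_join _ _ _ hmem with hm | ⟨p, hp, hcp⟩
    · simp at hm
    · rw [PySem.List.foldl_append_singleton_eq_map] at hp
      simp only [List.nil_append, List.mem_map] at hp
      obtain ⟨q, hq, hqp⟩ := hp
      obtain ⟨k, hk, hqk⟩ := (PySem.List.mem_enumerate_iff _ _ _).1 hq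
      have hcell : '\n' ∉ (PySem.Chars.splitOn line ['|'])[k] := by
        intro hc
        have hmem' : (PySem.Chars.splitOn line ['|'])[k] ∈ List.splitOn '|' line := by
          rw [← pvSplitOn_single line '|']
          exact List.getElem_mem hk
        exact h ((pvSplitOn_sound '|' line _ hmem').2 '\n' hc)
      subst hqk
      subst hqp
      dsimp at hcp
      split at hcp
      · exact hcell hcp
      · exact pvNoNl_normDelim _ _ (pvNoNl_normDelim _ _ hcell) hcp

-- B's first/middle/last slice decomposition equals A's enumerate loop
theorem pvCells_core {α : Type} (cells : List α) (h : 3 ≤ cells.length) (f : α → α) :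
    PySem.List.slice cells none (some 1) ++
      (PySem.List.slice cells (some 1) (some (-1))).map f ++
      PySem.List.slice cells (some (-1)) none =
    (PySem.List.enumerate cells 0).foldl (fun acc p =>
      acc ++ [if p.1 = 0 ∨ p.1 = PySem.List.len cells - 1 then p.2 else f p.2]) [] := by
  cases cells with
  | nil => simp at h
  | cons a t =>
    have ht : t ≠ [] := by intro hn; rw [hn] at h; simp at h
    obtain ⟨mid, z, rfl⟩ : ∃ mid z, t = mid ++ [z] :=
      ⟨t.dropLast, t.getLast ht, (List.dropLast_append_getLast ht).symm⟩
    rw [PySem.List.foldl_append_singleton_eq_map]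
    simp only [List.nil_append]
    have hn : (a :: (mid ++ [z])).length = mid.length + 2 := by simp
    have h1 : PySem.List.slice (a :: (mid ++ [z])) none (some 1) = [a] := by
      rw [PySem.List.slice_to (xs := a :: (mid ++ [z])) (b := 1) (by norm_num)]
      simp
    have h2 : PySem.List.slice (a :: (mid ++ [z])) (some (-1)) none = [z] := by
      rw [PySem.List.slice_from_neg_one, hn,
        show mid.length + 2 - 1 = mid.length + 1 from rfl, List.drop_succ_cons, List.drop_left]
    have h3 : PySem.List.slice (a :: (mid ++ [z])) (some 1) (some (-1)) = mid := by
      simp only [PySem.List.slice, PySem.List.clampIdx, hn]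
      norm_num
      rw [show (if (↑mid.length + 2 : Int) < 1 then 0 else ((mid.length : Int) + 2 + -1).toNat)
            = mid.length + 1 from by rw [if_neg (by omega)]; omega]
      rw [show mid.length + 1 - 1 = mid.length from rfl, List.take_left]
    rw [h1, h2, h3]
    rw [PySem.List.enumerate_cons, PySem.List.enumerate_append, PySem.List.enumerate_cons,
      PySem.List.enumerate_nil]
    simp only [List.map_cons, List.map_append, List.map_nil]
    have hlen' : PySem.List.len (a :: (mid ++ [z])) = (mid.length : Int) + 2 := by
      rw [PySem.List.len_eq, hn]; push_cast; ring
    rw [if_pos (Or.inl trivial), if_pos (Or.inr (by rw [hlen']; push_cast; ring))]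
    have hmid : List.map (fun p : Int × α =>
        if p.1 = 0 ∨ p.1 = PySem.List.len (a :: (mid ++ [z])) - 1 then p.2 else f p.2)
        (PySem.List.enumerate mid (0 + 1)) = List.map (fun p : Int × α => f p.2)
        (PySem.List.enumerate mid (0 + 1)) := by
      apply List.map_congr_left
      intro p hp
      obtain ⟨k, hk, rfl⟩ := (PySem.List.mem_enumerate_iff _ _ _).1 hp
      rw [if_neg]
      rw [hlen']
      push_cast
      omega
    rw [hmid, show (fun p : Int × α => f p.2) = f ∘ (fun p : Int × α => p.2) from rfl,
      ← List.map_map, PySem.List.map_snd_enumerate]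
    simp

-- B's per-line work = A's table pass followed by A's line pass, on any single line
theorem pvFixLine_eq (l : List Char) :
    pvFixLineB l = pvNormDelimA (pvNormDelimA (pvTableLineA l) ['*', '*']) ['_', '_'] := by
  rw [pvFixLineB, pvTableLineA]
  simp only [pvNormDelim_eq]
  by_cases hs : PySem.Chars.startswith (PySem.Chars.strip l) ['|'] = true
  · have hin : PySem.Chars.isIn ['|'] (PySem.Chars.strip l) = true := by
      rw [PySem.Chars.isIn_iff_infix]
      exact ((PySem.Chars.startswith_iff _ _).1 hs).isInfix
    simp only [hs, hin, if_true, Bool.not_true, Bool.or_self, Bool.false_eq_true, if_false]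
    by_cases hlen : 3 ≤ (PySem.Chars.splitOn l ['|']).length
    · rw [if_pos hlen, if_neg (by omega)]
      rw [pvCells_core _ hlen
        (fun cell => pvNormDelimA (pvNormDelimA cell ['*', '*']) ['_', '_'])]
    · rw [if_neg hlen, if_pos (by omega)]
  · simp only [Bool.not_eq_true] at hs
    simp [hs]

theorem pvSplitOn_ne_nil (cs : List Char) (ch : Char) : PySem.Chars.splitOn cs [ch] ≠ [] := by
  rw [pvSplitOn_single]; exact List.splitOnP_ne_nil _ cs

theorem pvRoundtrip (parts : List (List Char)) (h : ∀ p ∈ parts, '\n' ∉ p) (hne : parts ≠ []) :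
    PySem.Chars.splitOn (PySem.Chars.join ['\n'] parts) ['\n'] = parts := by
  rw [pvSplitOn_single]
  show List.splitOn '\n' (['\n'].intercalate parts) = parts
  exact List.splitOn_intercalate parts '\n' h hne

-- ===== VERDICT (by name: the statement is the Claim_ definition above) =====
theorem sanitize_ask_markdown_py_spec : Claim_equal_sanitize_ask_markdown_py := by
  intro text _
  unfold Spec_sanitize_ask_markdown_py sanitize_ask_markdown_py sanitize_ask_markdown_py_alt
  by_cases he : text.toList = []
  · rw [if_pos he, he]
    have : PySem.Chars.join ['\n'] (List.map pvFixLineB (PySem.Chars.splitOn [] ['\n'])) = [] := by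
      decide
    rw [this]
    have : text = "" := String.toList_eq_nil_iff.mp he
    rw [this]
  · rw [if_neg he]
    dsimp only
    have hlines : ∀ p ∈ PySem.Chars.splitOn text.toList ['\n'], '\n' ∉ p := by
      intro p hp
      rw [pvSplitOn_single] at hp
      exact (pvSplitOn_sound _ _ _ hp).1
    rw [PySem.List.foldl_append_singleton_eq_map (f := pvTableLineA),
      PySem.List.foldl_append_singleton_eq_map]
    simp only [List.nil_append]
    rw [pvRoundtrip _ (by
        intro p hp
        obtain ⟨q, hq, rfl⟩ := List.mem_map.1 hp
        exact pvNoNl_table q (hlines q hq))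
      (by simp only [ne_eq, List.map_eq_nil_iff]; exact pvSplitOn_ne_nil _ _)]
    rw [List.map_map]
    congr 1
    congr 1
    apply List.map_congr_left
    intro l _
    exact (pvFixLine_eq l).symm
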